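-- pv_equiv track=rewrite | github.com/naeemnew21/python-challenges | calender.py | list_days
-- ===== SOURCE A (Python) =====
-- def list_days(num_d_year , first_day ):
--        lis = ['sat','sun','mon','tus','wed','thu','fri']
--        ind = lis.index(first_day)
--        arranged_list = lis[ind:]+lis[:ind]  # to rearrange the list of days
--        days_list = []
--        year_days = 1 ; n = 0
--        while year_days <= num_d_year :   # this loop to create list with year days
--            days_list.append(arranged_list[n])
--            n+=1
--            if n == 7:
--                n=0
--            year_days+=1
--        return days_list
-- ===== SOURCE B (Python) =====
-- def list_days(num_d_year, first_day):
--     lis = ['sat', 'sun', 'mon', 'tus', 'wed', 'thu', 'fri']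
--     ind = lis.index(first_day)
--     arranged_list = lis[ind:] + lis[:ind]
--     count = max(num_d_year, 0)
--     return (arranged_list * (count // 7 + 1))[:count]
-- ===== Notes on version B (the rewrite author's own statement) =====
-- stated objective: faster
-- what changed: Replaces the per-day while loop with its manual cyclic counter by a single tiling step: repeat the rearranged week ceil-enough times and slice to max(num_d_year,0) days.
import Mathlib
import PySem

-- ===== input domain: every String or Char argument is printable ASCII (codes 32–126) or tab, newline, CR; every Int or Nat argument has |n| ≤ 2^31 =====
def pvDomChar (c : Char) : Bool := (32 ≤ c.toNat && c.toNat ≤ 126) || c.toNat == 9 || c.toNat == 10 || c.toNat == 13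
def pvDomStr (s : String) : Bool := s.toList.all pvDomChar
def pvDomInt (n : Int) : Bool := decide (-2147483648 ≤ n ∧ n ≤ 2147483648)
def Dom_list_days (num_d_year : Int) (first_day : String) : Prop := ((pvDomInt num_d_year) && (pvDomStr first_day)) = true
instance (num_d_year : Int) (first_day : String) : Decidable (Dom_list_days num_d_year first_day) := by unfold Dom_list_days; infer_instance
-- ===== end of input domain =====

-- B replaces A's per-day while loop (manual counter resetting at 7) by one tiling step:
-- repeat the rearranged week count//7+1 times and slice to count = max(num_d_year, 0) days.

-- ===== PORT A =====
-- A's while loop: one iteration per year_days = 1..num_d_year, so fuel = num_d_year.toNat;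
-- 'arranged_list[n]' is exact via pyGet? (getD "" is never hit: under Pre_ the list has 7
-- elements and n stays < 7).
def listDaysLoop (arr : List String) : Nat → Nat → List String
  | 0, _ => []
  | fuel + 1, n =>
      (PySem.List.pyGet? arr (n : Int)).getD "" ::
        listDaysLoop arr fuel (if n + 1 = 7 then 0 else n + 1)

def list_days (num_d_year : Int) (first_day : String) : List String :=
  let lis := ["sat", "sun", "mon", "tus", "wed", "thu", "fri"]
  match PySem.List.index? lis first_day with
  | none => []  -- Python raises ValueError here; excluded by Pre_list_days
  | some ind =>
      let arranged := PySem.List.slice lis (some (ind : Int)) none ++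
                      PySem.List.slice lis none (some (ind : Int))
      listDaysLoop arranged num_d_year.toNat 0

-- ===== PORT B =====
def list_days_alt (num_d_year : Int) (first_day : String) : List String :=
  let lis := ["sat", "sun", "mon", "tus", "wed", "thu", "fri"]
  match PySem.List.index? lis first_day with
  | none => []  -- Python raises ValueError here; excluded by Pre_list_days
  | some ind =>
      let arranged := PySem.List.slice lis (some (ind : Int)) none ++
                      PySem.List.slice lis none (some (ind : Int))
      let count := num_d_year.toNat  -- max(num_d_year, 0)
      (List.replicate (count / 7 + 1) arranged).flatten.take count

-- ===== PRECONDITION & SPEC =====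
-- Pre_ excludes exactly the inputs where A raises ValueError: first_day not a weekday name.
def Pre_list_days (num_d_year : Int) (first_day : String) : Prop :=
  first_day ∈ ["sat", "sun", "mon", "tus", "wed", "thu", "fri"]
instance (num_d_year : Int) (first_day : String) : Decidable (Pre_list_days num_d_year first_day) := by
  unfold Pre_list_days; infer_instance

def pvWitness_list_days : Int × String := (10, "wed")

def Spec_list_days (num_d_year : Int) (first_day : String) (out : List String) : Prop :=
  out = list_days_alt num_d_year first_day
instance (num_d_year : Int) (first_day : String) (out : List String) : Decidable (Spec_list_days num_d_year first_day out) := by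
  unfold Spec_list_days; infer_instance

-- ===== CLAIM (what is proved, stated in full; the proofs are below) =====
def Claim_equal_list_days : Prop := ∀ (num_d_year : Int) (first_day : String),
  Dom_list_days num_d_year first_day → Pre_list_days num_d_year first_day →
  Spec_list_days num_d_year first_day (list_days num_d_year first_day)

-- ===== LEMMAS AND PROOFS =====

-- Unrolling seven loop iterations from counter 0 consumes the week once.
lemma listDaysLoop_seven (a b c d e f g : String) (k : Nat) :
    listDaysLoop [a, b, c, d, e, f, g] (k + 7) 0 =
      [a, b, c, d, e, f, g] ++ listDaysLoop [a, b, c, d, e, f, g] k 0 := by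
  show listDaysLoop _ (k + 1 + 1 + 1 + 1 + 1 + 1 + 1) 0 = _
  simp [listDaysLoop, PySem.List.pyGet?, PySem.List.pyIdx?]

-- The loop from counter 0 equals the tiled-and-truncated week.
lemma listDaysLoop_eq_tile (a b c d e f g : String) (n : Nat) :
    listDaysLoop [a, b, c, d, e, f, g] n 0 =
      (List.replicate (n / 7 + 1) [a, b, c, d, e, f, g]).flatten.take n := by
  induction n using Nat.strong_induction_on with
  | _ n ih =>
    by_cases h : n < 7
    · have hn : n / 7 = 0 := Nat.div_eq_of_lt h
      rw [hn]
      interval_cases n <;> simp [listDaysLoop, PySem.List.pyGet?, PySem.List.pyIdx?]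
    · obtain ⟨m, rfl⟩ : ∃ m, n = m + 7 := ⟨n - 7, by omega⟩
      have hdiv : (m + 7) / 7 = m / 7 + 1 := by omega
      rw [listDaysLoop_seven, ih m (by omega), hdiv]
      conv_rhs => rw [List.replicate_succ, List.flatten_cons, List.take_append]
      rw [List.take_of_length_le (l := [a, b, c, d, e, f, g]) (by simp)]
      norm_num

theorem list_days_spec : Claim_equal_list_days := by
  intro n s _ hpre
  unfold Pre_list_days at hpre
  show list_days n s = list_days_alt n s
  simp only [List.mem_cons, List.not_mem_nil, or_false] at hpre
  rcases hpre with rfl | rfl | rfl | rfl | rfl | rfl | rfl <;>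
    simp only [list_days, list_days_alt] <;>
    norm_num [PySem.List.index?, PySem.List.slice, PySem.List.clampIdx] <;>
    exact listDaysLoop_eq_tile _ _ _ _ _ _ _ _
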